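-- pv_equiv track=rewrite | github.com/daniel-reich/ubiquitous-fiesta | fsNMnyjMkErQtvpMW_8.py | holey_sort
-- ===== SOURCE A (Python) =====
-- d = {'0': 1, '4': 1, '6': 1, '8': 2, '9': 1}
--
-- def holey_sort(lst):
--   y = [str(a) for a in lst]
--   new = []
--   for a in y:
--     s = 0
--     for b in a:
--       if b in d:
--         s += d[b]
--     new.append([s,a])
--   fin = []
--   while new:
--     fin.append(int([x[1] for x in new if x[0] == min([x[0] for x in new])][0]))
--     new.pop([new.index(x) for x in new if x[0]==min((x[0] for x in new))][0])
--   return fin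
-- ===== SOURCE B (Python) =====
-- d = {'0': 1, '4': 1, '6': 1, '8': 2, '9': 1}
--
-- def holey_sort(lst):
--   buckets = {}
--   for a in lst:
--     s = str(a)
--     c = 0
--     for ch in s:
--       c += d.get(ch, 0)
--     if c in buckets:
--       buckets[c].append(int(s))
--     else:
--       buckets[c] = [int(s)]
--   out = []
--   for k in sorted(buckets):
--     out += buckets[k]
--   return out
-- ===== Notes on version B (the rewrite author's own statement) =====
-- stated objective: faster
-- what changed: Replaced A's quadratic repeated-min selection loop (rescanning the remaining list with min/filter/index/pop each round) by a single pass that buckets each element into a dict keyed by its hole count, then one pass over the sorted keys concatenating the buckets (a counting/bucket sort).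
import Mathlib
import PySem

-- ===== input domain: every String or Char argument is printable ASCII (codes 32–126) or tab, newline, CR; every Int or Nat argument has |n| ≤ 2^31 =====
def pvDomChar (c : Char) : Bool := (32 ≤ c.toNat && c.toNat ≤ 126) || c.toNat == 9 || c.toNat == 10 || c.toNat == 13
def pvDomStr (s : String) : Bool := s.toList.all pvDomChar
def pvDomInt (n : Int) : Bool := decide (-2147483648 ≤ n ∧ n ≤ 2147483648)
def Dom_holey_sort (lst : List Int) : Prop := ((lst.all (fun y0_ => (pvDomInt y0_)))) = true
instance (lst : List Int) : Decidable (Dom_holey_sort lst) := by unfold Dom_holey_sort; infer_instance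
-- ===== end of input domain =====

-- B replaces A's quadratic repeated-min selection loop by a single-pass bucketing into a
-- hole-count-keyed dict followed by one pass over the sorted keys (a counting/bucket sort).

-- ===== PORT A =====
-- d = {'0': 1, '4': 1, '6': 1, '8': 2, '9': 1}
def pvD : PySem.Dict Char Int :=
  PySem.Dict.ofList [('0', 1), ('4', 1), ('6', 1), ('8', 2), ('9', 1)]

-- s = 0; for b in a: if b in d: s += d[b]
def pvHolesA (a : String) : Int :=
  a.toList.foldl (fun s b => if pvD.contains b then s + pvD.getD b 0 else s) 0

-- the while-loop; fuel = new.length (each iteration pops exactly one element).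
-- `[...][0]` is read with headD and `int(...)`/`pop` with getD: on a nonempty `new` the
-- filtered lists are nonempty, the index is in range and the string is str() of an int,
-- so Python raises nowhere here.
def pvSelLoop : Nat → List (Int × String) → List Int → List Int
  | 0, _, fin => fin
  | Nat.succ fuel, new, fin =>
    if new.isEmpty then fin
    else
      let m := (PySem.List.min? (new.map (fun x => x.1)) (fun y => y)).getD 0
      let cand := ((new.filter (fun x => x.1 == m)).map (fun x => x.2)).headD ""
      let idx := ((new.filter (fun x => x.1 == m)).map
                    (fun x => (PySem.List.index? new x).getD 0)).headD 0
      match PySem.List.pop? new (idx : Int) with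
      | none => fin
      | some (_, rest) => pvSelLoop fuel rest (fin ++ [(PySem.Int.ofStr? cand).getD 0])

def holey_sort (lst : List Int) : List Int :=
  let y := lst.map (fun a => PySem.Int.toStr a)
  let new := y.map (fun a => (pvHolesA a, a))
  pvSelLoop new.length new []

-- ===== PORT B =====
-- c = 0; for ch in s: c += d.get(ch, 0)
def pvHolesB (s : String) : Int :=
  s.toList.foldl (fun c ch => c + pvD.getD ch 0) 0

-- buckets: hole count -> list of int(s) in input order; then one pass over sorted keys.
-- 'if c in buckets: buckets[c].append(int(s)) else: buckets[c] = [int(s)]' is Dict.modify;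
-- buckets[k] on k ∈ keys is getD.
def holey_sort_alt (lst : List Int) : List Int :=
  let buckets := lst.foldl
    (fun D a =>
      let s := PySem.Int.toStr a
      D.modify (pvHolesB s) [] (fun old => old ++ [(PySem.Int.ofStr? s).getD 0]))
    PySem.Dict.empty
  (PySem.List.sorted buckets.keys (fun x => x)).foldl
    (fun out k => out ++ buckets.getD k []) []

-- ===== PRECONDITION & SPEC =====
def Spec_holey_sort (lst : List Int) (out : List Int) : Prop := out = holey_sort_alt lst
instance (lst : List Int) (out : List Int) : Decidable (Spec_holey_sort lst out) := by
  unfold Spec_holey_sort; infer_instance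

-- ===== CLAIM (what is proved, stated in full; the proofs are below) =====
def Claim_equal_holey_sort : Prop :=
  ∀ (lst : List Int), Dom_holey_sort lst → Spec_holey_sort lst (holey_sort lst)

-- ===== LEMMAS AND PROOFS =====

-- the common abstraction: each element contributes a (key, value) pair; the result is,
-- for each distinct key in ascending order, the values with that key in input order.
def pvT (l : List (Int × Int)) : List Int :=
  (PySem.List.sorted (PySem.Set.ofList (l.map Prod.fst)) (fun x => x)).flatMap
    (fun q => (l.filter (fun x => x.1 == q)).map Prod.snd)

def pvE (n : Int) : Int × Int :=
  (pvHolesA (PySem.Int.toStr n), (PySem.Int.ofStr? (PySem.Int.toStr n)).getD 0)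

theorem pvHolesB_eq (s : String) : pvHolesB s = pvHolesA s := by
  unfold pvHolesA pvHolesB
  apply PySem.List.foldl_congr_mem
  intro acc b _
  by_cases h : pvD.contains b
  · simp [h]
  · simp [h, PySem.Dict.getD_of_not_contains (h := by simpa using h)]

-- B's dict fold, in the (key, value)-pair form
theorem pvBucket (l : List (Int × Int)) :
    (PySem.List.sorted ((l.foldl (fun d p => d.modify p.1 [] (fun x => x ++ [p.2]))
        PySem.Dict.empty).keys) (fun x => x)).foldl
      (fun out k => out ++ (l.foldl (fun d p => d.modify p.1 [] (fun x => x ++ [p.2]))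
        PySem.Dict.empty).getD k []) []
    = pvT l := by
  unfold pvT
  have hkeys : (l.foldl (fun d p => d.modify p.1 [] (fun x => x ++ [p.2]))
      PySem.Dict.empty).keys = PySem.Set.ofList (l.map Prod.fst) := by
    rw [PySem.Dict.keys_foldl_modify_key l Prod.fst [] (fun _ p => (fun x => x ++ [p.2]))]
    simp [PySem.Set.ofList_eq_foldl, PySem.Set.update, PySem.Dict.keys_empty, List.foldl_map]
  rw [hkeys, PySem.List.foldl_append_eq_flatMap]
  simp only [List.nil_append]
  apply List.flatMap_congr
  intro q _
  rw [PySem.Dict.getD_foldl_modify_append]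
  simp [PySem.Dict.getD_empty]

-- B computes pvT
theorem pvB_eq (lst : List Int) : holey_sort_alt lst = pvT (lst.map pvE) := by
  unfold holey_sort_alt
  have hfold : lst.foldl
      (fun D a =>
        let s := PySem.Int.toStr a
        D.modify (pvHolesB s) [] (fun old => old ++ [(PySem.Int.ofStr? s).getD 0]))
      PySem.Dict.empty
    = (lst.map pvE).foldl (fun d p => d.modify p.1 [] (fun x => x ++ [p.2]))
        PySem.Dict.empty := by
    rw [List.foldl_map]
    apply PySem.List.foldl_congr_mem
    intro acc a _
    simp [pvE, pvHolesB_eq]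
  rw [hfold]
  exact pvBucket (lst.map pvE)

-- one step of pvT: removing the first minimal-key element p removes p.2, the head of pvT
theorem pvT_step (pre suf : List (Int × Int)) (p : Int × Int)
    (hpre : ∀ x ∈ pre, x.1 ≠ p.1)
    (hmin : ∀ x ∈ pre ++ p :: suf, p.1 ≤ x.1) :
    pvT (pre ++ p :: suf) = p.2 :: pvT (pre ++ suf) := by
  have hmemK : p.1 ∈ (pre ++ p :: suf).map Prod.fst :=
    List.mem_map.2 ⟨p, by simp, rfl⟩
  have hmX : p.1 ∈ PySem.Set.ofList ((pre ++ p :: suf).map Prod.fst) :=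
    (PySem.Set.mem_ofList _ _).2 hmemK
  have hSne : PySem.List.sorted (PySem.Set.ofList ((pre ++ p :: suf).map Prod.fst))
      (fun x => x) ≠ [] := by
    intro h
    rw [PySem.List.sorted_eq_nil_iff] at h
    rw [h] at hmX; exact List.not_mem_nil hmX
  obtain ⟨q, rest, hScons⟩ := List.exists_cons_of_ne_nil hSne
  have hmemS : ∀ x, x ∈ PySem.List.sorted (PySem.Set.ofList ((pre ++ p :: suf).map Prod.fst))
      (fun x => x) ↔ x ∈ (pre ++ p :: suf).map Prod.fst := by
    intro x
    rw [PySem.List.mem_sorted, PySem.Set.mem_ofList]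
  have hqm : q = p.1 := by
    have h1 : q ≤ p.1 := PySem.List.key_head_sorted_le _ (fun x => x) hScons p.1 hmX
    have h2 : p.1 ≤ q := by
      have hq : q ∈ (pre ++ p :: suf).map Prod.fst :=
        (hmemS q).1 (hScons ▸ List.mem_cons_self)
      obtain ⟨x, hx, hxq⟩ := List.mem_map.1 hq
      exact hxq ▸ hmin x hx
    omega
  have hSm : PySem.List.sorted (PySem.Set.ofList ((pre ++ p :: suf).map Prod.fst))
      (fun x => x) = p.1 :: rest := by rw [hScons, hqm]
  have hpw : List.Pairwise (fun a b => a < b)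
      (PySem.List.sorted (PySem.Set.ofList ((pre ++ p :: suf).map Prod.fst)) (fun x => x)) :=
    PySem.List.sorted_ofList_pairwise_lt _
  rw [hSm] at hpw
  have hrestlt : ∀ x ∈ rest, p.1 < x := (List.pairwise_cons.1 hpw).1
  have hrestpw : List.Pairwise (fun a b => a < b) rest := (List.pairwise_cons.1 hpw).2
  have hrestnd : rest.Nodup := hrestpw.imp (fun h => ne_of_lt h)
  have hmrest : p.1 ∉ rest := fun h => lt_irrefl _ (hrestlt _ h)
  -- membership in rest
  have hmemrest : ∀ x, x ∈ rest ↔ x ∈ (pre ++ p :: suf).map Prod.fst ∧ x ≠ p.1 := by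
    intro x
    constructor
    · intro hx
      refine ⟨(hmemS x).1 (hSm ▸ List.mem_cons_of_mem _ hx), ?_⟩
      intro he; exact hmrest (he ▸ hx)
    · intro ⟨hx, hne⟩
      have := (hmemS x).2 hx
      rw [hSm] at this
      rcases List.mem_cons.1 this with h | h
      · exact absurd h hne
      · exact h
  -- key-list decomposition
  have hKdec : ∀ x, x ∈ (pre ++ p :: suf).map Prod.fst ↔
      x ∈ (pre ++ suf).map Prod.fst ∨ x = p.1 := by
    intro x
    simp only [List.map_append, List.map_cons, List.mem_append, List.mem_cons]
    tauto
  -- filters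
  have hprefil : pre.filter (fun x => x.1 == p.1) = [] := by
    rw [List.filter_eq_nil_iff]
    intro x hx
    simpa using hpre x hx
  have hFm : (pre ++ p :: suf).filter (fun x => x.1 == p.1)
      = p :: suf.filter (fun x => x.1 == p.1) := by
    simp [List.filter_append, hprefil]
  have hF'm : (pre ++ suf).filter (fun x => x.1 == p.1)
      = suf.filter (fun x => x.1 == p.1) := by
    simp [List.filter_append, hprefil]
  have hFq : ∀ q', q' ≠ p.1 →
      (pre ++ p :: suf).filter (fun x => x.1 == q')
        = (pre ++ suf).filter (fun x => x.1 == q') := by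
    intro q' hne
    simp [List.filter_append, (by simpa using hne.symm : ¬ (p.1 = q'))]
  by_cases hin : p.1 ∈ (pre ++ suf).map Prod.fst
  · -- the sorted key lists coincide
    have hperm : (p.1 :: rest).Perm (PySem.Set.ofList ((pre ++ suf).map Prod.fst)) := by
      have h1 : (p.1 :: rest).Perm (PySem.Set.ofList ((pre ++ p :: suf).map Prod.fst)) :=
        hSm ▸ PySem.List.sorted_perm _ _ _
      refine h1.trans (List.perm_of_nodup_nodup_toFinset_eq
        (PySem.Set.nodup_ofList _) (PySem.Set.nodup_ofList _) ?_)
      ext x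
      simp only [List.mem_toFinset, PySem.Set.mem_ofList]
      rw [hKdec x]
      constructor
      · rintro (h | h)
        · exact h
        · exact h ▸ hin
      · intro h; exact Or.inl h
    have hS' : PySem.List.sorted (PySem.Set.ofList ((pre ++ suf).map Prod.fst))
        (fun x => x) = p.1 :: rest :=
      PySem.List.sorted_eq_of_perm_of_pairwise_lt _ _ _ hperm hpw
    unfold pvT
    rw [hSm, hS']
    simp only [List.flatMap_cons]
    rw [hFm, hF'm]
    have hcongr : rest.flatMap (fun q => ((pre ++ p :: suf).filter
        (fun x => x.1 == q)).map Prod.snd)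
        = rest.flatMap (fun q => ((pre ++ suf).filter (fun x => x.1 == q)).map Prod.snd) := by
      apply List.flatMap_congr
      intro q hq
      rw [hFq q (fun he => hmrest (he ▸ hq))]
    rw [hcongr]
    simp
  · -- p.1 disappears from the keys
    have hsuffil : suf.filter (fun x => x.1 == p.1) = [] := by
      rw [List.filter_eq_nil_iff]
      intro x hx hbe
      apply hin
      exact List.mem_map.2 ⟨x, List.mem_append_right _ hx, by simpa using hbe⟩
    have hperm : rest.Perm (PySem.Set.ofList ((pre ++ suf).map Prod.fst)) := by
      refine List.perm_of_nodup_nodup_toFinset_eq hrestnd (PySem.Set.nodup_ofList _) ?_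
      ext x
      simp only [List.mem_toFinset, PySem.Set.mem_ofList]
      rw [hmemrest x, hKdec x]
      constructor
      · rintro ⟨h | h, hne⟩
        · exact h
        · exact absurd h hne
      · intro h
        refine ⟨Or.inl h, ?_⟩
        intro he; exact hin (he ▸ h)
    have hrestpw' : List.Pairwise (fun a b => (fun x => x) a < (fun x => x) b) rest := hrestpw
    have hS' : PySem.List.sorted (PySem.Set.ofList ((pre ++ suf).map Prod.fst))
        (fun x => x) = rest :=
      PySem.List.sorted_eq_of_perm_of_pairwise_lt _ _ _ hperm hrestpw'
    unfold pvT
    rw [hSm, hS']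
    simp only [List.flatMap_cons]
    rw [hFm, hsuffil]
    have hcongr : rest.flatMap (fun q => ((pre ++ p :: suf).filter
        (fun x => x.1 == q)).map Prod.snd)
        = rest.flatMap (fun q => ((pre ++ suf).filter (fun x => x.1 == q)).map Prod.snd) := by
      apply List.flatMap_congr
      intro q hq
      rw [hFq q (fun he => hmrest (he ▸ hq))]
    rw [hcongr]
    simp

-- the selection loop computes pvT
theorem pvA_loop (fuel : Nat) : ∀ (new : List (Int × String)) (fin : List Int),
    new.length ≤ fuel →
    pvSelLoop fuel new fin
      = fin ++ pvT (new.map (fun p => (p.1, (PySem.Int.ofStr? p.2).getD 0))) := by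
  induction fuel with
  | zero =>
    intro new fin h
    have : new = [] := List.eq_nil_of_length_eq_zero (Nat.le_zero.1 h)
    subst this
    simp [pvSelLoop, pvT]
  | succ fuel ih =>
    intro new fin hlen
    by_cases hne : new = []
    · subst hne
      simp [pvSelLoop, pvT]
    · -- the min exists
      obtain ⟨m, hm⟩ : ∃ m, PySem.List.min? (new.map (fun x => x.1)) (fun y => y) = some m := by
        cases hmo : PySem.List.min? (new.map (fun x => x.1)) (fun y => y) with
        | none =>
          rw [PySem.List.min?_eq_none_iff] at hmo
          exact absurd (List.map_eq_nil_iff.1 hmo) hne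
        | some m => exact ⟨m, rfl⟩
      have hmmem : m ∈ new.map (fun x => x.1) := PySem.List.min?_mem hm
      have hmmin : ∀ y ∈ new.map (fun x => x.1), m ≤ y := PySem.List.min?_isMin hm
      -- the filter is nonempty
      have hfilne : new.filter (fun x => x.1 == m) ≠ [] := by
        obtain ⟨x, hx, hx1⟩ := List.mem_map.1 hmmem
        intro hnil
        rw [List.filter_eq_nil_iff] at hnil
        exact hnil x hx (by simpa using hx1)
      obtain ⟨c, cs, hfil⟩ := List.exists_cons_of_ne_nil hfilne
      obtain ⟨pre, suf, hdec, hprem, hc1, hsuffil⟩ := List.filter_eq_cons_iff.1 hfil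
      have hc1' : c.1 = m := by simpa using hc1
      -- index of c
      have hidx : PySem.List.index? new c = some pre.length := by
        rw [PySem.List.index?_eq_some_iff]
        exact ⟨pre, suf, hdec, rfl, fun hcp => (hprem c hcp) (by simpa using hc1')⟩
      have hplt : pre.length < new.length := by
        rw [hdec]; simp
      have hpop : PySem.List.pop? new ((pre.length : Nat) : Int)
          = some (new[pre.length], new.eraseIdx pre.length) :=
        PySem.List.pop?_natCast new pre.length hplt
      have herase : new.eraseIdx pre.length = pre ++ suf := by
        rw [hdec, List.eraseIdx_append_of_length_le (Nat.le_refl _)]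
        simp
      -- unfold one step
      rw [pvSelLoop]
      have hnotE : new.isEmpty = false := by simpa using hne
      simp only [hnotE, Bool.false_eq_true, if_false, hm, Option.getD_some, hfil,
        List.map_cons, List.headD_cons, hidx]
      rw [hpop]
      rw [herase]
      show pvSelLoop fuel (pre ++ suf) (fin ++ [(PySem.Int.ofStr? c.2).getD 0])
        = fin ++ pvT (new.map (fun p => (p.1, (PySem.Int.ofStr? p.2).getD 0)))
      rw [ih (pre ++ suf) _ (by rw [hdec] at hlen; simp at hlen ⊢; omega)]
      -- relate pvT of the two states
      have hmap : new.map (fun p => (p.1, (PySem.Int.ofStr? p.2).getD 0))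
          = pre.map (fun p => (p.1, (PySem.Int.ofStr? p.2).getD 0))
            ++ (c.1, (PySem.Int.ofStr? c.2).getD 0)
            :: suf.map (fun p => (p.1, (PySem.Int.ofStr? p.2).getD 0)) := by
        rw [hdec]; simp
      have hstep := pvT_step
        (pre.map (fun p => (p.1, (PySem.Int.ofStr? p.2).getD 0)))
        (suf.map (fun p => (p.1, (PySem.Int.ofStr? p.2).getD 0)))
        ((c.1, (PySem.Int.ofStr? c.2).getD 0))
        (by
          intro x hx
          obtain ⟨y, hy, rfl⟩ := List.mem_map.1 hx
          simpa [hc1'] using fun he => (hprem y hy) (by simpa using he))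
        (by
          intro x hx
          rw [← hmap] at hx
          obtain ⟨y, hy, rfl⟩ := List.mem_map.1 hx
          simp only [hc1']
          exact hmmin y.1 (List.mem_map.2 ⟨y, hy, rfl⟩))
      rw [hmap, hstep, ← List.map_append]
      simp

theorem pvA_eq (lst : List Int) : holey_sort lst = pvT (lst.map pvE) := by
  unfold holey_sort
  rw [pvA_loop _ _ _ (Nat.le_refl _)]
  rw [List.map_map, List.map_map]
  rfl

-- ===== VERDICT (by name: the statement is the Claim_ definition above) =====
theorem holey_sort_spec : Claim_equal_holey_sort := by
  intro lst _
  unfold Spec_holey_sort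
  rw [pvA_eq, pvB_eq]
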